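-- pv_equiv track=rewrite | github.com/MassimoLauria/adventofcode | 2019/code08.py | collapselayers
-- ===== SOURCE A (Python) =====
-- def collapselayers(layers):
--     N=len(layers)
--     s=len(layers[0])
--     res=['X']*s
--     for i in range(s):
--         for d in range(N):
--             if layers[d][i]!='2':
--                 res[i]=layers[d][i]
--                 break
--     return "".join(res)
-- ===== SOURCE B (Python) =====
-- def collapselayers(layers):
--     s = len(layers[0])
--     res = ['X'] * s
--     for layer in reversed(layers):
--         for i in range(min(s, len(layer))):
--             c = layer[i]
--             if c != '2':
--                 res[i] = c
--     return "".join(res)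
-- ===== Notes on version B (the rewrite author's own statement) =====
-- stated objective: alternative
-- what changed: B paints layers back-to-front (layer-major loop over reversed(layers), overwriting res[i] for every non-transparent pixel, no break) instead of A's pixel-major scan with an inner early-break search per column.
import Mathlib
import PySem

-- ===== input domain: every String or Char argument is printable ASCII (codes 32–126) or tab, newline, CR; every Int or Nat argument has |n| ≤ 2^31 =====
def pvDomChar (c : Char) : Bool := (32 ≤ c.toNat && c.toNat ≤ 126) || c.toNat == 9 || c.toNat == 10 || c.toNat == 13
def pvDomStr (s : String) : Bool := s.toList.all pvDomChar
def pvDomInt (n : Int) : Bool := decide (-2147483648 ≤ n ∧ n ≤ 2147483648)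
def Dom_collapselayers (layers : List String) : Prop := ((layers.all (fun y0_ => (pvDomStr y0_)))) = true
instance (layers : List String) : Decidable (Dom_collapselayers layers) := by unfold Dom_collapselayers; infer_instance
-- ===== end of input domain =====

-- B collapses the image by painting layers back-to-front (no early break) instead of A's per-pixel early-break scan: a different decomposition, with no speed claim.

-- ===== PORT A =====
-- inner 'for d in range(N): if layers[d][i] != '2': res[i] = …; break' loop;
-- hitting a short layer before the break is an IndexError in Python (excluded by Pre_), ported as keeping the initial 'X'.
def aCol (ls : List (List Char)) (i : Nat) : Char :=
  match ls with
  | [] => 'X'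
  | l :: rest =>
    if h : i < l.length then
      (if l[i] ≠ '2' then l[i] else aCol rest i)
    else 'X'   -- IndexError in Python (excluded by Pre_)

def collapselayers (layers : List String) : String :=
  let ls := layers.map (fun t => t.toList)
  let s := (ls.headD []).length
  String.mk ((List.range s).map (fun i => aCol ls i))

-- ===== PORT B =====
-- 'for i in range(min(s, len(layer))): if layer[i] != '2': res[i] = layer[i]'
def paintStep (l : List Char) (r : List Char) (i : Nat) : List Char :=
  let c := l.getD i 'X'
  if c ≠ '2' then r.set i c else r

def paintCol (s : Nat) (res : List Char) (l : List Char) : List Char :=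
  (List.range (min s l.length)).foldl (paintStep l) res

def collapselayers_alt (layers : List String) : String :=
  let ls := layers.map (fun t => t.toList)
  let s := (ls.headD []).length
  String.mk (ls.reverse.foldl (paintCol s) (List.replicate s 'X'))

-- ===== PRECONDITION & SPEC =====
-- Exactly the inputs on which A returns (no IndexError): layers is nonempty and, in every
-- column i, no layer shorter than i+1 is consulted before the first non-'2' pixel is found.
def Pre_collapselayers (layers : List String) : Prop :=
  layers ≠ [] ∧
  (∀ i < ((layers.map (fun t => t.toList)).headD []).length,
    ∀ d < layers.length,
      i < ((layers.map (fun t => t.toList)).getD d []).length ∨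
      ∃ e < d, i < ((layers.map (fun t => t.toList)).getD e []).length ∧
        ((layers.map (fun t => t.toList)).getD e []).getD i 'X' ≠ '2')
instance (layers : List String) : Decidable (Pre_collapselayers layers) := by
  unfold Pre_collapselayers; infer_instance

def pvWitness_collapselayers : List String := ["0220", "2102", "1111"]

def Spec_collapselayers (layers : List String) (out : String) : Prop := out = collapselayers_alt layers
instance (layers : List String) (out : String) : Decidable (Spec_collapselayers layers out) := by unfold Spec_collapselayers; infer_instance

-- ===== CLAIM (what is proved, stated in full; the proofs are below) =====
def Claim_equal_collapselayers : Prop := ∀ (layers : List String), Dom_collapselayers layers → Pre_collapselayers layers → Spec_collapselayers layers (collapselayers layers)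

-- ===== LEMMAS AND PROOFS =====

-- the first non-transparent pixel of column i, as both programs compute it
def firstO (ls : List (List Char)) (i : Nat) : Option Char :=
  ls.findSome? (fun l => if i < l.length ∧ l.getD i 'X' ≠ '2' then some (l.getD i 'X') else none)

-- column condition of Pre_ for one index i, over the char-list layers
def colOK (ls : List (List Char)) (i : Nat) : Prop :=
  ∀ d < ls.length, i < (ls.getD d []).length ∨
    ∃ e < d, i < (ls.getD e []).length ∧ (ls.getD e []).getD i 'X' ≠ '2'

theorem firstO_cons (l : List Char) (t : List (List Char)) (i : Nat) :
    firstO (l :: t) i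
      = if i < l.length ∧ l.getD i 'X' ≠ '2' then some (l.getD i 'X') else firstO t i := by
  unfold firstO
  rw [List.findSome?_cons]
  by_cases h : i < l.length ∧ l.getD i 'X' ≠ '2'
  · rw [if_pos h, if_pos h]
  · rw [if_neg h, if_neg h]

theorem aCol_cons_lt (l : List Char) (t : List (List Char)) (i : Nat) (h : i < l.length) :
    aCol (l :: t) i = if l[i] ≠ '2' then l[i] else aCol t i := by
  conv_lhs => rw [aCol]
  rw [dif_pos h]

theorem paintStep_length (l r : List Char) (i : Nat) :
    (paintStep l r i).length = r.length := by
  unfold paintStep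
  dsimp only
  split <;> simp

theorem paintStep_getElem? (l r : List Char) (m : Nat) (hm : m < r.length) (i : Nat) :
    (paintStep l r m)[i]?
      = if i = m ∧ l.getD m 'X' ≠ '2' then some (l.getD m 'X') else r[i]? := by
  unfold paintStep
  dsimp only
  by_cases hc : l.getD m 'X' ≠ '2'
  · rw [if_pos hc, List.getElem?_set]
    by_cases him : m = i
    · subst him
      rw [if_pos rfl, if_pos hm, if_pos ⟨rfl, hc⟩]
    · rw [if_neg him, if_neg (fun h => him h.1.symm)]
  · rw [if_neg hc, if_neg (fun h => hc h.2)]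

theorem paintColAux_length (l : List Char) (n : Nat) (res : List Char) :
    ((List.range n).foldl (paintStep l) res).length = res.length := by
  induction n generalizing res with
  | zero => simp
  | succ m ih =>
    rw [List.range_succ, List.foldl_append, List.foldl_cons, List.foldl_nil,
        paintStep_length, ih]

theorem paintColAux_getElem? (l : List Char) (n : Nat) (res : List Char)
    (hn : n ≤ res.length) (i : Nat) :
    ((List.range n).foldl (paintStep l) res)[i]?
      = if i < n ∧ l.getD i 'X' ≠ '2' then some (l.getD i 'X') else res[i]? := by
  induction n generalizing res with
  | zero => simp
  | succ m ih =>
    rw [List.range_succ, List.foldl_append, List.foldl_cons, List.foldl_nil]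
    rw [paintStep_getElem? l _ m (by rw [paintColAux_length]; omega) i, ih res (by omega)]
    by_cases him : i = m
    · subst him
      by_cases hc : l.getD i 'X' ≠ '2'
      · rw [if_pos ⟨rfl, hc⟩, if_pos ⟨Nat.lt_succ_self i, hc⟩]
      · rw [if_neg (fun h => hc h.2), if_neg (fun h => hc h.2), if_neg (fun h => hc h.2)]
    · rw [if_neg (fun h => him h.1)]
      by_cases hi : i < m ∧ l.getD i 'X' ≠ '2'
      · rw [if_pos hi, if_pos ⟨Nat.lt_succ_of_lt hi.1, hi.2⟩]
      · rw [if_neg hi, if_neg (fun h =>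
          hi ⟨Nat.lt_of_le_of_ne (Nat.lt_succ_iff.mp h.1) him, h.2⟩)]

theorem paintCol_length (s : Nat) (res l : List Char) :
    (paintCol s res l).length = res.length := by
  unfold paintCol; exact paintColAux_length l _ res

theorem paintCol_getElem? (s : Nat) (res l : List Char) (hres : res.length = s) (i : Nat) (hi : i < s) :
    (paintCol s res l)[i]?
      = if i < l.length ∧ l.getD i 'X' ≠ '2' then some (l.getD i 'X') else res[i]? := by
  unfold paintCol
  rw [paintColAux_getElem? l _ res (by omega)]
  by_cases h : i < l.length ∧ l.getD i 'X' ≠ '2'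
  · rw [if_pos ⟨lt_min hi h.1, h.2⟩, if_pos h]
  · rw [if_neg h, if_neg (fun hmin => h ⟨hmin.1.trans_le (min_le_right s l.length), hmin.2⟩)]

theorem paintFoldr_length (s : Nat) (ls : List (List Char)) (res : List Char) :
    (ls.foldr (fun l r => paintCol s r l) res).length = res.length := by
  induction ls with
  | nil => rfl
  | cons l t ih => rw [List.foldr_cons, paintCol_length, ih]

theorem paintFoldr_getElem? (s : Nat) (ls : List (List Char)) (res : List Char)
    (hres : res.length = s) (i : Nat) (hi : i < s) :
    (ls.foldr (fun l r => paintCol s r l) res)[i]? = (firstO ls i).or res[i]? := by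
  induction ls with
  | nil => simp [firstO]
  | cons l t ih =>
    rw [List.foldr_cons, paintCol_getElem? s _ l (by rw [paintFoldr_length]; exact hres) i hi,
        firstO_cons]
    by_cases h : i < l.length ∧ l.getD i 'X' ≠ '2'
    · rw [if_pos h, if_pos h]; rfl
    · rw [if_neg h, if_neg h, ih]

theorem aCol_eq_firstO (ls : List (List Char)) (i : Nat) (hC : colOK ls i) :
    aCol ls i = (firstO ls i).getD 'X' := by
  induction ls with
  | nil => simp [aCol, firstO]
  | cons l t ih =>
    have h0 : i < l.length := by
      rcases hC 0 (by simp) with h | h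
      · simpa using h
      · rcases h with ⟨e, he, _⟩; omega
    have hgd : l.getD i 'X' = l[i] := List.getD_eq_getElem l 'X' h0
    rw [aCol_cons_lt l t i h0, firstO_cons]
    by_cases hc : l[i] ≠ '2'
    · rw [if_pos hc, if_pos ⟨h0, by rw [hgd]; exact hc⟩, hgd]; rfl
    · rw [if_neg hc, if_neg (fun h => hc (by rw [← hgd]; exact h.2))]
      apply ih
      intro d hd
      rcases hC (d + 1) (by simpa using Nat.succ_lt_succ hd) with h | ⟨e, he, h1, h2⟩
      · left; simpa using h
      · match e, he with
        | 0, _ =>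
          exact absurd (by simpa [List.getD, List.getElem?_eq_getElem h0] using h2) hc
        | e' + 1, he =>
          right
          exact ⟨e', by omega, by simpa using h1, by simpa using h2⟩

theorem collapse_cols (ls : List (List Char)) (s : Nat)
    (hC : ∀ i < s, colOK ls i) :
    (List.range s).map (fun i => aCol ls i)
      = ls.reverse.foldl (paintCol s) (List.replicate s 'X') := by
  rw [List.foldl_reverse]
  apply List.ext_getElem?
  intro i
  by_cases hi : i < s
  · rw [List.getElem?_map, List.getElem?_range hi]
    simp only [Option.map_some]
    rw [paintFoldr_getElem? s ls _ (by simp) i hi]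
    rw [List.getElem?_replicate, if_pos hi]
    rw [aCol_eq_firstO ls i (hC i hi)]
    cases firstO ls i <;> rfl
  · rw [List.getElem?_eq_none (by simpa using hi),
        List.getElem?_eq_none (by rw [paintFoldr_length]; simpa using hi)]

-- ===== VERDICT (by name: the statement is the Claim_ definition above) =====
theorem collapselayers_spec : Claim_equal_collapselayers := by
  intro layers _ hpre
  unfold Spec_collapselayers collapselayers collapselayers_alt
  have := collapse_cols (layers.map (fun t => t.toList))
    ((layers.map (fun t => t.toList)).headD []).length
    (by
      intro i hi d hd
      exact hpre.2 i hi d (by simpa using hd))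
  simpa using congrArg String.mk this
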